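-- pv_equiv track=rewrite | github.com/jesslyn1999/leetcode_doses | (custom)min-cost-collect-balls/main.py | min_cost_collect_balls
-- ===== SOURCE A (Python) =====
-- from collections import deque
-- from typing import List
--
-- def min_cost_collect_balls(m: int, n: int, position: int, table: List[int]) -> int:
--     """
--     Find the minimum cost to collect all types of balls.
--
--     Args:
--         m: Number of positions in the table
--         n: Number of ball types to collect
--         position: Starting position (1-indexed)
--         table: Array representing the ball types at each position (1-indexed)
--
--     Returns:
--         Minimum total cost to collect all required balls
--     """
--     # Convert position to 0-indexed for easier array manipulation
--     position = position - 1
--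
--     # Create a set of ball types that need to be collected
--     required_balls = set(range(1, n+1))
--
--     # Use BFS to find the minimum cost
--     queue = deque([(position, 0, set())])  # (position, cost, collected_balls)
--     visited = set([(position, frozenset())])  # (position, frozenset of collected_balls)
--
--     while queue:
--         pos, cost, collected = queue.popleft()
--
--         # If position is valid, collect the ball at current position
--         if 0 <= pos < m:
--             ball_type = table[pos]
--             new_collected = collected.copy()
--             if ball_type in required_balls:
--                 new_collected.add(ball_type)
--
--             # Check if we've collected all required balls
--             if len(new_collected) == n:
--                 return cost
--
--             # Convert to frozenset for hashing in the visited set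
--             collected_frozen = frozenset(new_collected)
--
--             # Try moving left
--             if (pos-1, collected_frozen) not in visited:
--                 visited.add((pos-1, collected_frozen))
--                 queue.append((pos-1, cost+1, new_collected))
--
--             # Try moving right
--             if (pos+1, collected_frozen) not in visited:
--                 visited.add((pos+1, collected_frozen))
--                 queue.append((pos+1, cost+1, new_collected))
--
--     return -1  # If it's impossible to collect all ball types
-- ===== SOURCE B (Python) =====
-- def min_cost_collect_balls(m: int, n: int, position: int, table):
--     """Interval sweep: the walk's visited cells form an interval [L, R] containing the
--     start; minimise (R-L) + min(p0-L, R-p0) over intervals whose cells cover all types."""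
--     p0 = position - 1
--     if p0 < 0 or p0 >= m:
--         return -1
--     best = -1
--     for L in range(p0 + 1):
--         R = _first_cover(m, n, p0, table, L)
--         if R is not None:
--             c = (R - L) + min(p0 - L, R - p0)
--             if best == -1 or c < best:
--                 best = c
--     return best
--
-- def _first_cover(m, n, p0, table, L):
--     """Smallest R with R >= p0 such that table[L..R] contains every type 1..n."""
--     seen = set()
--     for R in range(L, m):
--         t = table[R]
--         if 1 <= t <= n:
--             seen.add(t)
--         if R >= p0 and len(seen) == n:
--             return R
--     return None
-- ===== Notes on version B (the rewrite author's own statement) =====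
-- stated objective: alternative
-- what changed: Replaces the BFS over (position, collected-ball-set) states with a direct interval sweep: a walk's visited cells form an interval [L,R] containing the start, so B minimises (R-L)+min(p0-L,R-p0) over the smallest covering interval for each left end; Pre_ excludes inputs where the start is in range but m exceeds len(table), on which A indexes table beyond its end and generally raises IndexError.
-- outside the precondition, e.g. on min_cost_collect_balls(5, 1, 1, [1]): A returns 0, B returns 0
import Mathlib
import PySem

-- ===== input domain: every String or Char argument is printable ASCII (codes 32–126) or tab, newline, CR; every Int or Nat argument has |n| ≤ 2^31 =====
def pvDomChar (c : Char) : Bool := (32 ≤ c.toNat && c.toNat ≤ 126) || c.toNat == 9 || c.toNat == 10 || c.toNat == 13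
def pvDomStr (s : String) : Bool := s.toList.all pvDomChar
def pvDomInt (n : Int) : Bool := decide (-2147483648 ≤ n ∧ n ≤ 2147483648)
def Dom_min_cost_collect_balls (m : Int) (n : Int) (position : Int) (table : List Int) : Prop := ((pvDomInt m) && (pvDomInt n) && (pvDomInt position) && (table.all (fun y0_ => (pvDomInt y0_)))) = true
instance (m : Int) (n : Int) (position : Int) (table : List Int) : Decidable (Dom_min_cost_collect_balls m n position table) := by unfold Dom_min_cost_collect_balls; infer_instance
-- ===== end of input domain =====

-- ===== PORT A =====
-- B replaces A's BFS over (position, collected-set) states by a sweep over candidate intervals (objective: alternative).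
-- pvBfsA: A's `while queue:` loop; the Nat argument is plain fuel making the recursion structural
-- (proved sufficient below); tuple-in-set membership `(pos, frozenset) not in visited` is ported by
-- hand as a scan comparing the frozenset component with Set.equal (exact: tuple == uses frozenset ==).
def pvBfsA (m n : Int) (table : List Int) (req : PySem.Set Int) :
    Nat → List (Int × Int × PySem.Set Int) → List (Int × PySem.Set Int) → Int
  | 0, _, _ => -1
  | _ + 1, [], _ => -1
  | f + 1, (pos, cost, collected) :: rest, visited =>
    if 0 ≤ pos ∧ pos < m then
      let ballType := PySem.List.pyGetD table pos 0
      let newCollected := if PySem.Set.contains req ballType then PySem.Set.add collected ballType else collected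
      if PySem.Set.len newCollected = n then cost
      else
        let visL := visited.any (fun e => e.1 == pos - 1 && PySem.Set.equal e.2 newCollected)
        let q1 := if visL then rest else rest ++ [(pos - 1, cost + 1, newCollected)]
        let v1 := if visL then visited else visited ++ [(pos - 1, newCollected)]
        let visR := v1.any (fun e => e.1 == pos + 1 && PySem.Set.equal e.2 newCollected)
        let q2 := if visR then q1 else q1 ++ [(pos + 1, cost + 1, newCollected)]
        let v2 := if visR then v1 else v1 ++ [(pos + 1, newCollected)]
        pvBfsA m n table req f q2 v2
    else pvBfsA m n table req f rest visited

def min_cost_collect_balls (m : Int) (n : Int) (position : Int) (table : List Int) : Int :=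
  let position' := position - 1
  -- set(range(1, n+1)): the range has no duplicates, so the Python set is the range list itself
  -- (PySem.Set.ofList_eq_self_of_nodup, PySem.List.nodup_pyRange_one); built directly so the
  -- construction is linear in n like Python's
  let requiredBalls : PySem.Set Int := PySem.List.pyRange 1 (n + 1) 1
  pvBfsA m n table requiredBalls (2 * ((m.toNat + 3) * 2 ^ table.length) + 4)
    [(position', 0, PySem.Set.empty)] [(position', PySem.Set.empty)]

-- ===== PORT B =====
-- _first_cover: smallest R ≥ p0 with all of 1..n present in table[L..R] (seen grows along the scan)
def pvFirstCover (n p0 : Int) (table : List Int) : PySem.Set Int → List Int → Option Int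
  | _, [] => none
  | seen, r :: rs =>
    let t := PySem.List.pyGetD table r 0
    let seen' := if 1 ≤ t ∧ t ≤ n then PySem.Set.add seen t else seen
    if p0 ≤ r ∧ PySem.Set.len seen' = n then some r
    else pvFirstCover n p0 table seen' rs

def min_cost_collect_balls_alt (m : Int) (n : Int) (position : Int) (table : List Int) : Int :=
  let p0 := position - 1
  if p0 < 0 ∨ m ≤ p0 then -1
  else
    (PySem.List.pyRange 0 (p0 + 1) 1).foldl
      (fun best L =>
        match pvFirstCover n p0 table PySem.Set.empty (PySem.List.pyRange L m 1) with
        | none => best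
        | some r =>
          let c := (r - L) + min (p0 - L) (r - p0)
          if best = -1 ∨ c < best then c else best)
      (-1)

-- ===== PRECONDITION & SPEC =====
-- Pre_ excludes inputs where the start is in range but m exceeds len(table): there A indexes
-- table[pos] beyond its end and generally raises IndexError (it returns only when every type
-- happens to be collected before an out-of-range index is reached).
def Pre_min_cost_collect_balls (m : Int) (n : Int) (position : Int) (table : List Int) : Prop :=
  m ≤ (table.length : Int) ∨ ¬ (0 ≤ position - 1 ∧ position - 1 < m)
instance (m : Int) (n : Int) (position : Int) (table : List Int) : Decidable (Pre_min_cost_collect_balls m n position table) := by unfold Pre_min_cost_collect_balls; infer_instance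
def pvWitness_min_cost_collect_balls : Int × Int × Int × List Int := (2, 1, 1, [1, 2])
def Spec_min_cost_collect_balls (m : Int) (n : Int) (position : Int) (table : List Int) (out : Int) : Prop := out = min_cost_collect_balls_alt m n position table
instance (m : Int) (n : Int) (position : Int) (table : List Int) (out : Int) : Decidable (Spec_min_cost_collect_balls m n position table out) := by unfold Spec_min_cost_collect_balls; infer_instance

-- ===== CLAIM (what is proved, stated in full; the proofs are below) =====
def Claim_equal_min_cost_collect_balls : Prop := ∀ (m : Int) (n : Int) (position : Int) (table : List Int), Dom_min_cost_collect_balls m n position table → Pre_min_cost_collect_balls m n position table → Spec_min_cost_collect_balls m n position table (min_cost_collect_balls m n position table)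

-- ===== LEMMAS AND PROOFS =====
-- Abstract view of A's state space: a state is (position, set of collected required types).
def pvTv (table : List Int) (j : Int) : Int := PySem.List.pyGetD table j 0

def pvUpd (n : Int) (table : List Int) (s : Int × Finset Int) : Finset Int :=
  if 1 ≤ pvTv table s.1 ∧ pvTv table s.1 ≤ n then insert (pvTv table s.1) s.2 else s.2

def pvStep (m n : Int) (table : List Int) (s t : Int × Finset Int) : Prop :=
  (0 ≤ s.1 ∧ s.1 < m) ∧ (t = (s.1 - 1, pvUpd n table s) ∨ t = (s.1 + 1, pvUpd n table s))

def pvReach (m n : Int) (table : List Int) (p0 : Int) : Nat → (Int × Finset Int) → Prop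
  | 0, s => s = (p0, (∅ : Finset Int))
  | k+1, t => ∃ s, pvReach m n table p0 k s ∧ pvStep m n table s t

def pvGoal (m n : Int) (table : List Int) (s : Int × Finset Int) : Prop :=
  (0 ≤ s.1 ∧ s.1 < m) ∧ (((pvUpd n table s).card : Int) = n)

def pvDminIs (m n : Int) (table : List Int) (p0 : Int) (k : Nat) : Prop :=
  (∃ s, pvReach m n table p0 k s ∧ pvGoal m n table s) ∧
  (∀ j s, pvReach m n table p0 j s → pvGoal m n table s → k ≤ j)

def pvNoGoal (m n : Int) (table : List Int) (p0 : Int) : Prop :=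
  ∀ j s, pvReach m n table p0 j s → ¬ pvGoal m n table s

-- the common answer characterization both ports are proved to satisfy
def pvAnsIs (m n : Int) (table : List Int) (p0 : Int) (r : Int) : Prop :=
  (∃ k : Nat, r = (k : Int) ∧ pvDminIs m n table p0 k) ∨ (r = -1 ∧ pvNoGoal m n table p0)

-- covering intervals and the walk-cost formula
def pvCovF (n : Int) (table : List Int) (L R : Int) : Prop :=
  ∀ t, 1 ≤ t → t ≤ n → ∃ j, L ≤ j ∧ j ≤ R ∧ pvTv table j = t

def pvCov (m n : Int) (table : List Int) (p0 L R : Int) : Prop :=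
  0 ≤ L ∧ L ≤ p0 ∧ p0 ≤ R ∧ R < m ∧ 0 ≤ n ∧ pvCovF n table L R

def pvW (p0 L R : Int) : Int := (R - L) + min (p0 - L) (R - p0)

-- collected types along a list of positions
def pvCollect (n : Int) (table : List Int) (l : List Int) : Finset Int :=
  ((l.map (pvTv table)).filter (fun t => decide (1 ≤ t) && decide (t ≤ n))).toFinset

-- paths
def pvAdj (a b : Int) : Prop := b = a - 1 ∨ b = a + 1

lemma pvChain_asc (a b : Int) : List.IsChain pvAdj (PySem.List.pyRange a b 1) := by
  by_cases h : b ≤ a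
  · rw [PySem.List.pyRange_one_eq_nil h]; exact List.isChain_nil
  · push_neg at h
    have : ∀ N a, (b - a).toNat = N → List.IsChain pvAdj (PySem.List.pyRange a b 1) := by
      intro N
      induction N using Nat.strong_induction_on with
      | _ N ih =>
        intro a hN
        by_cases hab : b ≤ a
        · rw [PySem.List.pyRange_one_eq_nil hab]; exact List.isChain_nil
        · push_neg at hab
          rw [PySem.List.pyRange_one_cons hab]
          rw [List.isChain_cons']
          refine ⟨?_, ih (b - (a+1)).toNat (by omega) (a+1) rfl⟩
          intro y hy
          by_cases h2 : b ≤ a + 1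
          · rw [PySem.List.pyRange_one_eq_nil h2] at hy; cases hy
          · push_neg at h2
            rw [PySem.List.pyRange_one_cons h2] at hy
            cases hy
            right; rfl
    exact this (b - a).toNat a rfl

lemma pvChain_desc (a b : Int) : List.IsChain pvAdj (PySem.List.pyRange a b (-1)) := by
  rw [PySem.List.pyRange_neg_one_eq_reverse, List.isChain_reverse]
  have h := pvChain_asc (b+1) (a+1)
  refine List.IsChain.imp ?_ h
  intro x y hxy
  rcases hxy with h1 | h1
  · right; omega
  · left; omega

lemma pvHead_pyRange_one (a b : Int) (h : a < b) :
    (PySem.List.pyRange a b 1).head? = some a := by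
  rw [PySem.List.pyRange_one_cons h]; rfl

lemma pvLast_pyRange_one (a b : Int) (h : a < b) :
    (PySem.List.pyRange a b 1).getLast? = some (b - 1) := by
  have h1 : a ≤ b - 1 := by omega
  have : PySem.List.pyRange a b 1 = PySem.List.pyRange a (b-1) 1 ++ [b-1] := by
    have := PySem.List.pyRange_one_succ_right (a := a) (b := b - 1) h1
    rw [show b - 1 + 1 = b from by omega] at this
    exact this
  rw [this, List.getLast?_append_of_ne_nil] <;> simp

lemma pvHead_pyRange_neg_one (a b : Int) (h : b < a) :
    (PySem.List.pyRange a b (-1)).head? = some a := by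
  rw [PySem.List.pyRange_neg_one_cons h]; rfl

lemma pvLast_pyRange_neg_one (a b : Int) (h : b < a) :
    (PySem.List.pyRange a b (-1)).getLast? = some (b + 1) := by
  rw [PySem.List.pyRange_neg_one_eq_reverse, List.getLast?_reverse]
  exact pvHead_pyRange_one (b+1) (a+1) (by omega)

-- ---------- small bridges ----------
lemma pvCollect_mem (n : Int) (table : List Int) (l : List Int) (t : Int) :
    t ∈ pvCollect n table l ↔ (1 ≤ t ∧ t ≤ n ∧ ∃ j ∈ l, pvTv table j = t) := by
  simp only [pvCollect, List.mem_toFinset, List.mem_filter, List.mem_map]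
  constructor
  · rintro ⟨⟨j, hj, rfl⟩, hc⟩
    simp only [Bool.and_eq_true, decide_eq_true_eq] at hc
    exact ⟨hc.1, hc.2, j, hj, rfl⟩
  · rintro ⟨h1, h2, j, hj, rfl⟩
    exact ⟨⟨j, hj, rfl⟩, by simp [h1, h2]⟩

lemma pvCollect_append (n : Int) (table : List Int) (l : List Int) (x : Int) :
    pvCollect n table (l ++ [x]) =
      if 1 ≤ pvTv table x ∧ pvTv table x ≤ n then insert (pvTv table x) (pvCollect n table l)
      else pvCollect n table l := by
  simp only [pvCollect, List.map_append, List.filter_append, List.toFinset_append,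
    List.map_cons, List.map_nil]
  split_ifs with h
  · simp only [List.filter, decide_eq_true_eq, h.1, h.2, decide_true, Bool.and_self]
    simp [Finset.union_comm]
  · have hcond : (decide (1 ≤ pvTv table x) && decide (pvTv table x ≤ n)) = false := by
      rw [Bool.and_eq_false_iff]
      by_cases h1 : 1 ≤ pvTv table x
      · right; simpa using fun h2 => h ⟨h1, h2⟩
      · left; simpa using h1
    have : (List.filter (fun t => decide (1 ≤ t) && decide (t ≤ n)) [pvTv table x]) = [] := by
      simp [List.filter, hcond]
    simp [this]

-- length = n test for a distinct list of required types
lemma pvLen_eq_iff (n : Int) (l : List Int) (hnd : l.Nodup) (hsub : ∀ x ∈ l, 1 ≤ x ∧ x ≤ n) :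
    ((l.length : Int) = n ↔ (0 ≤ n ∧ ∀ t, 1 ≤ t → t ≤ n → t ∈ l)) := by
  have hsubF : l.toFinset ⊆ Finset.Icc 1 n := by
    intro x hx
    rw [List.mem_toFinset] at hx
    rw [Finset.mem_Icc]
    exact hsub x hx
  have hcard : l.toFinset.card = l.length := List.toFinset_card_of_nodup hnd
  have hIcc : (Finset.Icc (1 : Int) n).card = (n + 1 - 1).toNat := Int.card_Icc 1 n
  constructor
  · intro h
    have h0 : 0 ≤ n := by omega
    refine ⟨h0, fun t h1 h2 => ?_⟩
    have : l.toFinset = Finset.Icc 1 n := by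
      apply Finset.eq_of_subset_of_card_le hsubF
      rw [hcard, hIcc]; omega
    have : t ∈ l.toFinset := by rw [this, Finset.mem_Icc]; exact ⟨h1, h2⟩
    rwa [List.mem_toFinset] at this
  · rintro ⟨h0, hall⟩
    have : Finset.Icc (1 : Int) n ⊆ l.toFinset := by
      intro t ht
      rw [Finset.mem_Icc] at ht
      rw [List.mem_toFinset]
      exact hall t ht.1 ht.2
    have heq : l.toFinset = Finset.Icc 1 n := Finset.Subset.antisymm hsubF this
    have := heq ▸ hcard
    rw [hIcc] at this
    omega

-- ---------- PART 1: reach ↔ walks ↔ intervals ----------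
lemma pvReach_walk (m n : Int) (table : List Int) (p0 : Int) :
    ∀ (k : Nat) (s : Int × Finset Int), pvReach m n table p0 k s →
    ∃ l x, l.length = k ∧ (l ++ [x]).head? = some p0 ∧ List.IsChain pvAdj (l ++ [x]) ∧
      (∀ y ∈ l, 0 ≤ y ∧ y < m) ∧ x = s.1 ∧ s.2 = pvCollect n table l := by
  intro k
  induction k with
  | zero =>
    intro s hs
    rw [pvReach] at hs
    subst hs
    refine ⟨[], p0, rfl, rfl, by simp, by simp, rfl, ?_⟩
    simp [pvCollect]
  | succ k ih =>
    intro t ht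
    rw [pvReach] at ht
    obtain ⟨s, hs, hstep⟩ := ht
    obtain ⟨l, x, hlen, hhead, hchain, hvalid, hx, hcol⟩ := ih s hs
    obtain ⟨hvalidx, hch⟩ := hstep
    subst hx
    refine ⟨l ++ [s.1], t.1, by simp [hlen], ?_, ?_, ?_, rfl, ?_⟩
    · rw [List.head?_append_of_ne_nil _ (by simp)]
      exact hhead
    · rw [List.isChain_append]
      refine ⟨hchain, List.isChain_singleton _, ?_⟩
      intro u hu y hy
      rw [List.getLast?_concat] at hu
      cases hu
      cases hy
      rcases hch with h | h <;> rw [h]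
      · left; rfl
      · right; rfl
    · intro y hy
      rcases List.mem_append.mp hy with h | h
      · exact hvalid y h
      · rw [List.mem_singleton.mp h]; exact hvalidx
    · have ht2 : t.2 = pvUpd n table s := by
        rcases hch with h | h <;> rw [h]
      rw [ht2, pvCollect_append, pvUpd, hcol]

lemma pvWalk_reach (m n : Int) (table : List Int) (p0 : Int) :
    ∀ (l : List Int) (x : Int), (l ++ [x]).head? = some p0 → List.IsChain pvAdj (l ++ [x]) →
    (∀ y ∈ l, 0 ≤ y ∧ y < m) →
    pvReach m n table p0 l.length (x, pvCollect n table l) := by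
  intro l
  induction l using List.reverseRecOn with
  | nil =>
    intro x hhead _ _
    simp at hhead
    rw [List.length_nil, pvReach, hhead]
    simp [pvCollect]
  | append_singleton l y ih =>
    intro x hhead hchain hvalid
    have hne : l ++ [y] ≠ [] := by simp
    have hhead' : (l ++ [y]).head? = some p0 := by
      rw [List.head?_append_of_ne_nil _ hne] at hhead
      exact hhead
    have hchain' : List.IsChain pvAdj (l ++ [y]) :=
      ((List.isChain_append).mp hchain).1
    have hvalid' : ∀ z ∈ l, 0 ≤ z ∧ z < m := fun z hz => hvalid z (by simp [hz])
    have hreach := ih y hhead' hchain' hvalid'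
    have hlen : (l ++ [y]).length = l.length + 1 := by simp
    rw [hlen, pvReach]
    refine ⟨(y, pvCollect n table l), hreach, ?_, ?_⟩
    · exact hvalid y (by simp)
    · have hadj : pvAdj y x := by
        obtain ⟨_, _, hlink⟩ := (List.isChain_append).mp hchain
        exact hlink y (by rw [List.getLast?_concat]; rfl) x rfl
      have hupd : pvUpd n table (y, pvCollect n table l) = pvCollect n table (l ++ [y]) := by
        rw [pvCollect_append, pvUpd]
      rcases hadj with h | h
      · left
        rw [Prod.ext_iff]
        exact ⟨h, by rw [hupd]⟩
      · right
        rw [Prod.ext_iff]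
        exact ⟨h, by rw [hupd]⟩

lemma pvChain_disp (l : List Int) (h : List.IsChain pvAdj l) :
    ∀ i j, (hi : i < l.length) → (hj : j < l.length) → i ≤ j →
      l[j]'hj - l[i]'hi ≤ (j : Int) - i ∧ l[i]'hi - l[j]'hj ≤ (j : Int) - i := by
  intro i j hi hj hij
  induction j, hij using Nat.le_induction with
  | base => simp
  | succ j hij ih =>
    have hj' : j < l.length := by omega
    have hadj := h.getElem j (by omega)
    have := ih hj'
    rcases hadj with ha | ha <;> rw [ha] <;> push_cast <;> omega

-- lower bound: a reached goal state yields a covering interval of walk-cost ≤ k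
lemma pvGoal_to_cov (m n : Int) (table : List Int) (p0 : Int) (k : Nat) (s : Int × Finset Int)
    (hr : pvReach m n table p0 k s) (hg : pvGoal m n table s) :
    ∃ L R, pvCov m n table p0 L R ∧ pvW p0 L R ≤ (k : Int) := by
  obtain ⟨l, x, hlen, hhead, hchain, hvalid, hx, hcol⟩ := pvReach_walk m n table p0 k s hr
  set π := l ++ [x] with hpi
  have hvalidpi : ∀ y ∈ π, 0 ≤ y ∧ y < m := by
    intro y hy
    rcases List.mem_append.mp hy with h | h
    · exact hvalid y h
    · rw [List.mem_singleton.mp h, hx]; exact hg.1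
  have hupdcol : pvUpd n table s = pvCollect n table π := by
    rw [hpi, pvCollect_append, pvUpd, hcol, hx]
  have hcardn : (((pvCollect n table π).card : Int)) = n := by rw [← hupdcol]; exact hg.2
  have h0n : 0 ≤ n := by omega
  have hsubIcc : pvCollect n table π ⊆ Finset.Icc 1 n := by
    intro t ht
    obtain ⟨h1, h2, _⟩ := (pvCollect_mem n table π t).mp ht
    rw [Finset.mem_Icc]; exact ⟨h1, h2⟩
  have hColEq : pvCollect n table π = Finset.Icc 1 n := by
    apply Finset.eq_of_subset_of_card_le hsubIcc
    rw [Int.card_Icc]; omega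
  have hne' : π.toFinset.Nonempty := ⟨x, by simp [hpi]⟩
  set L := π.toFinset.min' hne' with hL
  set R := π.toFinset.max' hne' with hR
  have hLmem : L ∈ π := by
    have := π.toFinset.min'_mem hne'; rwa [List.mem_toFinset] at this
  have hRmem : R ∈ π := by
    have := π.toFinset.max'_mem hne'; rwa [List.mem_toFinset] at this
  have hLle : ∀ y ∈ π, L ≤ y := fun y hy => Finset.min'_le _ _ (by rwa [List.mem_toFinset])
  have hleR : ∀ y ∈ π, y ≤ R := fun y hy => Finset.le_max' _ _ (by rwa [List.mem_toFinset])
  have hp0pi : p0 ∈ π := List.mem_of_mem_head? (by rw [hhead]; rfl)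
  have hlenpi : π.length = k + 1 := by simp [hpi, hlen]
  refine ⟨L, R, ⟨(hvalidpi L hLmem).1, hLle p0 hp0pi, hleR p0 hp0pi, (hvalidpi R hRmem).2, h0n, ?_⟩, ?_⟩
  · intro t h1 h2
    have : t ∈ pvCollect n table π := by rw [hColEq, Finset.mem_Icc]; exact ⟨h1, h2⟩
    obtain ⟨_, _, j, hj, hjt⟩ := (pvCollect_mem n table π t).mp this
    exact ⟨j, hLle j hj, hleR j hj, hjt⟩
  · obtain ⟨iL, hiL, hiLv⟩ := List.mem_iff_getElem.mp hLmem
    obtain ⟨iR, hiR, hiRv⟩ := List.mem_iff_getElem.mp hRmem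
    have hpi0 : π[0]'(by omega) = p0 := by
      have : π[0]? = some p0 := by rw [← List.head?_eq_getElem?]; exact hhead
      rw [List.getElem?_eq_getElem (by omega)] at this
      injection this
    rcases le_total iL iR with hir | hir
    · have h1 := pvChain_disp π hchain 0 iL (by omega) hiL (by omega)
      have h2 := pvChain_disp π hchain iL iR hiL hiR hir
      rw [hpi0, hiLv] at h1
      rw [hiLv, hiRv] at h2
      unfold pvW
      omega
    · have h1 := pvChain_disp π hchain 0 iR (by omega) hiR (by omega)
      have h2 := pvChain_disp π hchain iR iL hiR hiL hir
      rw [hpi0, hiRv] at h1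
      rw [hiRv, hiLv] at h2
      unfold pvW
      omega

-- upper bound: every covering interval yields a reached goal state at exactly its walk cost
lemma pvCov_to_goal (m n : Int) (table : List Int) (p0 L R : Int)
    (hc : pvCov m n table p0 L R) :
    ∃ (k : Nat) (s : Int × Finset Int), (k : Int) = pvW p0 L R ∧
      pvReach m n table p0 k s ∧ pvGoal m n table s := by
  obtain ⟨hL0, hLp, hpR, hRm, h0n, hcf⟩ := hc
  -- the collected set of any walk visiting all of [L, R] is exactly {1..n}
  have hColEq : ∀ l : List Int, (∀ j, L ≤ j → j ≤ R → j ∈ l) → (∀ y ∈ l, L ≤ y ∧ y ≤ R) →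
      pvCollect n table l = Finset.Icc 1 n := by
    intro l hall _hin
    apply Finset.Subset.antisymm
    · intro t ht
      obtain ⟨h1, h2, _⟩ := (pvCollect_mem n table l t).mp ht
      rw [Finset.mem_Icc]; exact ⟨h1, h2⟩
    · intro t ht
      rw [Finset.mem_Icc] at ht
      obtain ⟨j, hj1, hj2, hj3⟩ := hcf t ht.1 ht.2
      exact (pvCollect_mem n table l t).mpr ⟨ht.1, ht.2, j, hall j hj1 hj2, hj3⟩
  have hgoal_of : ∀ (l : List Int) (x : Int), 0 ≤ x → x < m →
      pvCollect n table (l ++ [x]) = Finset.Icc 1 n →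
      pvGoal m n table (x, pvCollect n table l) := by
    intro l x hx1 hx2 hcoll
    refine ⟨⟨hx1, hx2⟩, ?_⟩
    have : pvUpd n table (x, pvCollect n table l) = pvCollect n table (l ++ [x]) := by
      rw [pvCollect_append, pvUpd]
    rw [this, hcoll, Int.card_Icc]
    omega
  by_cases hLR : L = R
  · -- single-cell interval: L = R = p0, the trivial walk [p0]
    have hLp0 : L = p0 := by omega
    refine ⟨0, (p0, pvCollect n table []), by unfold pvW; simp [pvCollect]; omega, ?_, ?_⟩
    · have := pvWalk_reach m n table p0 [] p0 (by rfl) (by simp) (by simp)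
      simpa using this
    · apply hgoal_of [] p0 (by omega) (by omega)
      apply hColEq
      · intro j hj1 hj2
        have : j = p0 := by omega
        simp [this]
      · intro y hy
        simp at hy
        omega
  · have hLR' : L < R := by omega
    rcases le_or_gt (p0 - L) (R - p0) with hdir | hdir
    · -- go left to L first, finish at R
      set down := PySem.List.pyRange p0 (L-1) (-1) with hdown
      set l := down ++ PySem.List.pyRange (L+1) R 1 with hl
      have hsplit : l ++ [R] = down ++ PySem.List.pyRange (L+1) (R+1) 1 := by
        rw [hl, List.append_assoc]
        congr 1
        have := PySem.List.pyRange_one_succ_right (a := L+1) (b := R) (by omega)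
        rw [this]
      have hdne : down ≠ [] := by
        rw [hdown, PySem.List.pyRange_neg_one_cons (by omega)]; simp
      have hmemdown : ∀ y ∈ down, L ≤ y ∧ y ≤ p0 := by
        intro y hy
        rw [hdown, PySem.List.mem_pyRange_neg_one] at hy
        omega
      have hmemup : ∀ y ∈ PySem.List.pyRange (L+1) (R+1) 1, L ≤ y ∧ y ≤ R := by
        intro y hy
        rw [PySem.List.mem_pyRange_one] at hy
        omega
      have hmempi : ∀ j, L ≤ j → j ≤ R → j ∈ l ++ [R] := by
        intro j hj1 hj2
        rw [hsplit, List.mem_append]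
        rcases le_or_gt j p0 with h | h
        · left; rw [hdown, PySem.List.mem_pyRange_neg_one]; omega
        · right; rw [PySem.List.mem_pyRange_one]; omega
      have hboundpi : ∀ y ∈ l ++ [R], L ≤ y ∧ y ≤ R := by
        intro y hy
        rw [hsplit, List.mem_append] at hy
        rcases hy with h | h
        · have := hmemdown y h; omega
        · exact hmemup y h
      have hhead : (l ++ [R]).head? = some p0 := by
        rw [hsplit, List.head?_append_of_ne_nil _ hdne, hdown,
          pvHead_pyRange_neg_one p0 (L-1) (by omega)]
      have hchain : List.IsChain pvAdj (l ++ [R]) := by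
        rw [hsplit, List.isChain_append]
        refine ⟨by rw [hdown]; exact pvChain_desc _ _, pvChain_asc _ _, ?_⟩
        intro u hu y hy
        rw [hdown, pvLast_pyRange_neg_one p0 (L-1) (by omega)] at hu
        rw [pvHead_pyRange_one (L+1) (R+1) (by omega)] at hy
        cases hu; cases hy
        right; omega
      have hvalidl : ∀ y ∈ l, 0 ≤ y ∧ y < m := by
        intro y hy
        have : y ∈ l ++ [R] := by rw [List.mem_append]; left; exact hy
        have := hboundpi y this
        omega
      have hreach := pvWalk_reach m n table p0 l R hhead hchain hvalidl
      have hlenl : (l.length : Int) = pvW p0 L R := by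
        rw [hl, hdown]
        rw [List.length_append, PySem.List.length_pyRange_neg_one, PySem.List.length_pyRange_one]
        unfold pvW
        push_cast
        omega
      refine ⟨l.length, (R, pvCollect n table l), hlenl, hreach, ?_⟩
      exact hgoal_of l R (by omega) hRm (hColEq _ hmempi hboundpi)
    · -- go right to R first, finish at L
      set up := PySem.List.pyRange p0 (R+1) 1 with hup
      set l := up ++ PySem.List.pyRange (R-1) L (-1) with hl
      have hdesc_succ : PySem.List.pyRange (R-1) (L-1) (-1) = PySem.List.pyRange (R-1) L (-1) ++ [L] := by
        rw [PySem.List.pyRange_neg_one_eq_reverse, PySem.List.pyRange_neg_one_eq_reverse]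
        rw [show L - 1 + 1 = L from by omega, show R - 1 + 1 = R from by omega]
        rw [PySem.List.pyRange_one_cons (by omega : L < R), List.reverse_cons]
      have hsplit : l ++ [L] = up ++ PySem.List.pyRange (R-1) (L-1) (-1) := by
        rw [hl, List.append_assoc, hdesc_succ]
      have hupne : up ≠ [] := by
        rw [hup, PySem.List.pyRange_one_cons (by omega)]; simp
      have hmemup : ∀ y ∈ up, p0 ≤ y ∧ y ≤ R := by
        intro y hy
        rw [hup, PySem.List.mem_pyRange_one] at hy
        omega
      have hmemdown : ∀ y ∈ PySem.List.pyRange (R-1) (L-1) (-1), L ≤ y ∧ y ≤ R := by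
        intro y hy
        rw [PySem.List.mem_pyRange_neg_one] at hy
        omega
      have hmempi : ∀ j, L ≤ j → j ≤ R → j ∈ l ++ [L] := by
        intro j hj1 hj2
        rw [hsplit, List.mem_append]
        rcases le_or_gt p0 j with h | h
        · left; rw [hup, PySem.List.mem_pyRange_one]; omega
        · right; rw [PySem.List.mem_pyRange_neg_one]; omega
      have hboundpi : ∀ y ∈ l ++ [L], L ≤ y ∧ y ≤ R := by
        intro y hy
        rw [hsplit, List.mem_append] at hy
        rcases hy with h | h
        · have := hmemup y h; omega
        · exact hmemdown y h
      have hhead : (l ++ [L]).head? = some p0 := by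
        rw [hsplit, List.head?_append_of_ne_nil _ hupne, hup,
          pvHead_pyRange_one p0 (R+1) (by omega)]
      have hchain : List.IsChain pvAdj (l ++ [L]) := by
        rw [hsplit, List.isChain_append]
        refine ⟨by rw [hup]; exact pvChain_asc _ _, pvChain_desc _ _, ?_⟩
        intro u hu y hy
        rw [hup, pvLast_pyRange_one p0 (R+1) (by omega)] at hu
        rw [pvHead_pyRange_neg_one (R-1) (L-1) (by omega)] at hy
        cases hu; cases hy
        left; omega
      have hvalidl : ∀ y ∈ l, 0 ≤ y ∧ y < m := by
        intro y hy
        have : y ∈ l ++ [L] := by rw [List.mem_append]; left; exact hy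
        have := hboundpi y this
        omega
      have hreach := pvWalk_reach m n table p0 l L hhead hchain hvalidl
      have hlenl : (l.length : Int) = pvW p0 L R := by
        rw [hl, hup]
        rw [List.length_append, PySem.List.length_pyRange_one, PySem.List.length_pyRange_neg_one]
        unfold pvW
        push_cast
        omega
      refine ⟨l.length, (L, pvCollect n table l), hlenl, hreach, ?_⟩
      exact hgoal_of l L hL0 (by omega) (hColEq _ hmempi hboundpi)

lemma pvAnsIs_unique (m n : Int) (table : List Int) (p0 r r' : Int)
    (h : pvAnsIs m n table p0 r) (h' : pvAnsIs m n table p0 r') : r = r' := by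
  rcases h with ⟨k, rfl, ⟨⟨s, hs, hg⟩, hmin⟩⟩ | ⟨rfl, hng⟩
  · rcases h' with ⟨k', rfl, ⟨⟨s', hs', hg'⟩, hmin'⟩⟩ | ⟨rfl, hng'⟩
    · have := hmin k' s' hs' hg'
      have := hmin' k s hs hg
      omega
    · exact absurd hg (hng' k s hs)
  · rcases h' with ⟨k', rfl, ⟨⟨s', hs', hg'⟩, _⟩⟩ | ⟨rfl, _⟩
    · exact absurd hg' (hng k' s' hs')
    · rfl

-- ---------- PART B: the alt port satisfies pvAnsIs ----------
def pvGood (m n : Int) (table : List Int) (p0 L R : Int) : Prop :=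
  p0 ≤ R ∧ R < m ∧ 0 ≤ n ∧ pvCovF n table L R

lemma pvFirstCover_spec (m n p0 L : Int) (table : List Int) :
    ∀ (N : Nat) (a : Int) (seen : PySem.Set Int), (m - a).toNat = N → L ≤ a → seen.Nodup →
    (∀ x, x ∈ seen ↔ (1 ≤ x ∧ x ≤ n ∧ ∃ j, L ≤ j ∧ j < a ∧ pvTv table j = x)) →
    (pvFirstCover n p0 table seen (PySem.List.pyRange a m 1) = none ↔
        ∀ R, a ≤ R → R < m → ¬ pvGood m n table p0 L R) ∧
    (∀ R, pvFirstCover n p0 table seen (PySem.List.pyRange a m 1) = some R ↔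
        (a ≤ R ∧ R < m ∧ pvGood m n table p0 L R ∧ ∀ R', a ≤ R' → R' < R → ¬ pvGood m n table p0 L R')) := by
  intro N
  induction N using Nat.strong_induction_on with
  | _ N ih =>
    intro a seen hN ha hnd hmem
    by_cases ham : m ≤ a
    · rw [PySem.List.pyRange_one_eq_nil ham]
      have hres : pvFirstCover n p0 table seen [] = none := rfl
      rw [hres]
      constructor
      · constructor
        · intro _ R h1 h2
          exact (by omega : False).elim
        · intro _
          rfl
      · intro R
        constructor
        · intro h
          simp at h
        · rintro ⟨h1, h2, _, _⟩
          exact (by omega : False).elim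
    · push_neg at ham
      rw [PySem.List.pyRange_one_cons ham]
      simp only [pvFirstCover]
      set t := PySem.List.pyGetD table a 0 with ht
      set seen' := if 1 ≤ t ∧ t ≤ n then PySem.Set.add seen t else seen with hseen'
      have htv : t = pvTv table a := rfl
      have hnd' : seen'.Nodup := by
        rw [hseen']; split_ifs with hc
        · exact PySem.Set.nodup_add seen t hnd
        · exact hnd
      have hmem' : ∀ x, x ∈ seen' ↔ (1 ≤ x ∧ x ≤ n ∧ ∃ j, L ≤ j ∧ j < a + 1 ∧ pvTv table j = x) := by
        intro x
        rw [hseen']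
        split_ifs with hc
        · rw [PySem.Set.mem_add seen t x, hmem x]
          constructor
          · rintro (⟨h1, h2, j, hj1, hj2, hj3⟩ | rfl)
            · exact ⟨h1, h2, j, hj1, by omega, hj3⟩
            · exact ⟨hc.1, hc.2, a, ha, by omega, htv.symm⟩
          · rintro ⟨h1, h2, j, hj1, hj2, hj3⟩
            by_cases hja : j = a
            · right; rw [← hj3, hja, htv]
            · left; exact ⟨h1, h2, j, hj1, by omega, hj3⟩
        · rw [hmem x]
          constructor
          · rintro ⟨h1, h2, j, hj1, hj2, hj3⟩
            exact ⟨h1, h2, j, hj1, by omega, hj3⟩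
          · rintro ⟨h1, h2, j, hj1, hj2, hj3⟩
            refine ⟨h1, h2, j, hj1, ?_, hj3⟩
            by_cases hja : j = a
            · exfalso; rw [hja, ← htv] at hj3; rw [← hj3] at h1 h2; exact hc ⟨h1, h2⟩
            · omega
      have hsub' : ∀ x ∈ seen', 1 ≤ x ∧ x ≤ n := fun x hx => ⟨((hmem' x).mp hx).1, ((hmem' x).mp hx).2.1⟩
      have hlen : (PySem.Set.len seen' = n) ↔ (0 ≤ n ∧ ∀ x, 1 ≤ x → x ≤ n → x ∈ seen') := by
        rw [PySem.Set.len]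
        exact_mod_cast pvLen_eq_iff n seen' hnd' hsub'
      have hGa : (p0 ≤ a ∧ PySem.Set.len seen' = n) ↔ pvGood m n table p0 L a := by
        rw [hlen]
        unfold pvGood pvCovF
        constructor
        · rintro ⟨h1, h2, h3⟩
          refine ⟨h1, ham, h2, fun x hx1 hx2 => ?_⟩
          obtain ⟨_, _, j, hj1, hj2, hj3⟩ := (hmem' x).mp (h3 x hx1 hx2)
          exact ⟨j, hj1, by omega, hj3⟩
        · rintro ⟨h1, _, h2, h3⟩
          refine ⟨h1, h2, fun x hx1 hx2 => ?_⟩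
          obtain ⟨j, hj1, hj2, hj3⟩ := h3 x hx1 hx2
          exact (hmem' x).mpr ⟨hx1, hx2, j, hj1, by omega, hj3⟩
      split_ifs with hcheck
      · have hGood := hGa.mp hcheck
        constructor
        · constructor
          · intro h
            exact h.elim
          · intro hall
            exact absurd hGood (hall a le_rfl ham)
        · intro R
          constructor
          · intro h
            injection h with h
            subst h
            exact ⟨le_rfl, ham, hGood, fun R' h1 h2 => (by omega : False).elim⟩
          · rintro ⟨h1, h2, h3, h4⟩
            by_cases hRa : R = a
            · rw [hRa]
            · exact absurd hGood (h4 a le_rfl (by omega))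
      · have hnGa : ¬ pvGood m n table p0 L a := fun hg => hcheck (hGa.mpr hg)
        have hrec := ih (m - (a + 1)).toNat (by omega) (a + 1) seen' (by rfl) (by omega) hnd' hmem'
        constructor
        · rw [hrec.1]
          constructor
          · intro hall R hR1 hR2
            by_cases hRa : R = a
            · rw [hRa]; exact hnGa
            · exact hall R (by omega) hR2
          · intro hall R hR1 hR2
            exact hall R (by omega) hR2
        · intro R
          rw [hrec.2 R]
          constructor
          · rintro ⟨h1, h2, h3, h4⟩
            refine ⟨by omega, h2, h3, fun R' hR1 hR2 => ?_⟩
            by_cases hRa : R' = a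
            · rw [hRa]; exact hnGa
            · exact h4 R' (by omega) hR2
          · rintro ⟨h1, h2, h3, h4⟩
            have hRa : R ≠ a := fun hc => hnGa (hc ▸ h3)
            exact ⟨by omega, h2, h3, fun R' hR1 hR2 => h4 R' (by omega) hR2⟩

-- fold-minimum characterization of B's outer loop
lemma pvFold_spec (gc : Int → Option Int)
    (step : Int → Int → Int)
    (hstep : ∀ best L, step best L = match gc L with
      | none => best
      | some c => if best = -1 ∨ c < best then c else best)
    (Ls : List Int)
    (hpos : ∀ L ∈ Ls, ∀ c, gc L = some c → 0 ≤ c) :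
      (Ls.foldl step (-1) = -1 ∧ ∀ L ∈ Ls, gc L = none) ∨
      ((∃ L ∈ Ls, gc L = some (Ls.foldl step (-1))) ∧
        ∀ L ∈ Ls, ∀ c, gc L = some c → Ls.foldl step (-1) ≤ c) := by
  induction Ls using List.reverseRecOn with
  | nil => exact Or.inl ⟨rfl, by simp⟩
  | append_singleton Ls L ih =>
    have hpos' : ∀ L' ∈ Ls, ∀ c, gc L' = some c → 0 ≤ c := by
      intro L' hL' c hc; exact hpos L' (by simp [hL']) c hc
    have hfold : (Ls ++ [L]).foldl step (-1) = step (Ls.foldl step (-1)) L := by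
      rw [List.foldl_append]; rfl
    rw [hfold, hstep]
    cases hg : gc L with
    | none =>
      dsimp only
      rcases ih hpos' with ⟨hr, hnone⟩ | ⟨⟨L0, hL0, hsome⟩, hbnd⟩
      · left
        refine ⟨hr, fun L' hL' => ?_⟩
        rcases List.mem_append.mp hL' with h | h
        · exact hnone L' h
        · rw [List.mem_singleton.mp h]; exact hg
      · right
        refine ⟨⟨L0, by simp [hL0], hsome⟩, fun L' hL' c hc => ?_⟩
        rcases List.mem_append.mp hL' with h | h
        · exact hbnd L' h c hc
        · rw [List.mem_singleton.mp h] at hc; rw [hc] at hg; cases hg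
    | some c =>
      dsimp only
      rcases ih hpos' with ⟨hr, hnone⟩ | ⟨⟨L0, hL0, hsome⟩, hbnd⟩
      · rw [hr, if_pos (Or.inl rfl)]
        right
        refine ⟨⟨L, by simp, hg⟩, fun L' hL' c' hc' => ?_⟩
        rcases List.mem_append.mp hL' with h | h
        · rw [hnone L' h] at hc'; cases hc'
        · rw [List.mem_singleton.mp h] at hc'; rw [hc'] at hg; cases hg; omega
      · have hr0 : 0 ≤ Ls.foldl step (-1) := hpos' L0 hL0 _ hsome
        by_cases hlt : c < Ls.foldl step (-1)
        · rw [if_pos (Or.inr hlt)]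
          right
          refine ⟨⟨L, by simp, hg⟩, fun L' hL' c' hc' => ?_⟩
          rcases List.mem_append.mp hL' with h | h
          · have := hbnd L' h c' hc'; omega
          · rw [List.mem_singleton.mp h] at hc'; rw [hc'] at hg; cases hg; omega
        · rw [if_neg (by omega)]
          right
          refine ⟨⟨L0, by simp [hL0], hsome⟩, fun L' hL' c' hc' => ?_⟩
          rcases List.mem_append.mp hL' with h | h
          · exact hbnd L' h c' hc'
          · rw [List.mem_singleton.mp h] at hc'; rw [hc'] at hg; cases hg; omega

lemma pvAlt_ansIs (m n position : Int) (table : List Int)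
    (hv : 0 ≤ position - 1 ∧ position - 1 < m) :
    pvAnsIs m n table (position - 1) (min_cost_collect_balls_alt m n position table) := by
  have hwmono : ∀ L r1 R', L ≤ position - 1 → position - 1 ≤ r1 → r1 ≤ R' →
      pvW (position - 1) L r1 ≤ pvW (position - 1) L R' := by
    intro L r1 R' h1 h2 h3
    unfold pvW
    omega
  unfold min_cost_collect_balls_alt
  rw [if_neg (by omega)]
  set p0 := position - 1 with hp0
  set gc : Int → Option Int := fun L =>
    (pvFirstCover n p0 table PySem.Set.empty (PySem.List.pyRange L m 1)).map
      (fun r => (r - L) + min (p0 - L) (r - p0)) with hgc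
  have hspec : ∀ L : Int,
      (pvFirstCover n p0 table PySem.Set.empty (PySem.List.pyRange L m 1) = none ↔
        ∀ R, L ≤ R → R < m → ¬ pvGood m n table p0 L R) ∧
      (∀ R, pvFirstCover n p0 table PySem.Set.empty (PySem.List.pyRange L m 1) = some R ↔
        (L ≤ R ∧ R < m ∧ pvGood m n table p0 L R ∧ ∀ R', L ≤ R' → R' < R → ¬ pvGood m n table p0 L R')) := by
    intro L
    refine pvFirstCover_spec m n p0 L table (m - L).toNat L PySem.Set.empty rfl le_rfl
      List.nodup_nil ?_
    intro x
    constructor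
    · intro hx
      cases hx
    · rintro ⟨_, _, j, hj1, hj2, _⟩
      exact (by omega : False).elim
  have hgcw : ∀ L c, gc L = some c →
      ∃ r0, pvFirstCover n p0 table PySem.Set.empty (PySem.List.pyRange L m 1) = some r0 ∧
        c = (r0 - L) + min (p0 - L) (r0 - p0) := by
    intro L c hc
    rw [hgc] at hc
    simp only [Option.map_eq_some_iff] at hc
    obtain ⟨r0, h1, h2⟩ := hc
    exact ⟨r0, h1, h2.symm⟩
  have hstep : ∀ (best L : Int),
      (fun best L =>
        match pvFirstCover n p0 table PySem.Set.empty (PySem.List.pyRange L m 1) with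
        | none => best
        | some r =>
          let c := (r - L) + min (p0 - L) (r - p0)
          if best = -1 ∨ c < best then c else best) best L =
      (match gc L with
        | none => best
        | some c => if best = -1 ∨ c < best then c else best) := by
    intro best L
    cases hr : pvFirstCover n p0 table ([] : PySem.Set Int) (PySem.List.pyRange L m 1) with
    | none => simp [hgc, PySem.Set.empty, hr]
    | some r => simp [hgc, PySem.Set.empty, hr]
  have hpos : ∀ L ∈ PySem.List.pyRange 0 (p0 + 1) 1, ∀ c, gc L = some c → 0 ≤ c := by
    intro L hL c hc
    rw [PySem.List.mem_pyRange_one] at hL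
    obtain ⟨r0, hr0, rfl⟩ := hgcw L c hc
    obtain ⟨_, hrm, ⟨hpr, _, _, _⟩, _⟩ := ((hspec L).2 r0).mp hr0
    omega
  have hfold := pvFold_spec gc _ hstep (PySem.List.pyRange 0 (p0 + 1) 1) hpos
  rcases hfold with ⟨hres, hnone⟩ | ⟨⟨L0, hL0, hsome⟩, hbnd⟩
  · rw [hres]
    right
    refine ⟨rfl, fun j s hr hg => ?_⟩
    obtain ⟨L, R, hcov, _⟩ := pvGoal_to_cov m n table p0 j s hr hg
    obtain ⟨hL0', hLp, hpR, hRm, hn0, hcf⟩ := hcov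
    have hLmem : L ∈ PySem.List.pyRange 0 (p0 + 1) 1 := by
      rw [PySem.List.mem_pyRange_one]; omega
    have := hnone L hLmem
    rw [hgc] at this
    simp only [Option.map_eq_none_iff] at this
    exact ((hspec L).1.mp this) R (by omega) hRm ⟨hpR, hRm, hn0, hcf⟩
  · obtain ⟨r0, hr0, hval⟩ := hgcw L0 _ hsome
    obtain ⟨hLr0, hr0m, ⟨hpr0, _, hn0, hcf0⟩, _⟩ := ((hspec L0).2 r0).mp hr0
    rw [PySem.List.mem_pyRange_one] at hL0
    have hcov0 : pvCov m n table p0 L0 r0 := ⟨by omega, by omega, hpr0, hr0m, hn0, hcf0⟩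
    obtain ⟨k, s, hk, hreach, hgoal⟩ := pvCov_to_goal m n table p0 L0 r0 hcov0
    unfold pvW at hk
    left
    refine ⟨k, by omega, ⟨⟨s, hreach, hgoal⟩, fun j s' hr' hg' => ?_⟩⟩
    obtain ⟨L', R', hcov', hw'⟩ := pvGoal_to_cov m n table p0 j s' hr' hg'
    obtain ⟨hL0'', hLp', hpR', hRm', hn0', hcf'⟩ := hcov'
    have hLmem' : L' ∈ PySem.List.pyRange 0 (p0 + 1) 1 := by
      rw [PySem.List.mem_pyRange_one]; omega
    have hgsome : ∃ r1, pvFirstCover n p0 table PySem.Set.empty (PySem.List.pyRange L' m 1) = some r1 := by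
      cases hr1 : pvFirstCover n p0 table PySem.Set.empty (PySem.List.pyRange L' m 1) with
      | none => exact absurd ⟨hpR', hRm', hn0', hcf'⟩ (((hspec L').1.mp hr1) R' (by omega) hRm')
      | some r1 => exact ⟨r1, rfl⟩
    obtain ⟨r1, hr1⟩ := hgsome
    obtain ⟨hLr1, hr1m, ⟨hpr1, _, _, _⟩, hmin1⟩ := ((hspec L').2 r1).mp hr1
    have hr1R' : r1 ≤ R' := by
      by_contra hcon
      exact (hmin1 R' (by omega) (by omega)) ⟨hpR', hRm', hn0', hcf'⟩
    have hbnd' := hbnd L' hLmem' ((r1 - L') + min (p0 - L') (r1 - p0)) (by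
      rw [hgc]
      simp only [Option.map_eq_some_iff]
      exact ⟨r1, hr1, rfl⟩)
    have hmono := hwmono L' r1 R' (by omega) hpr1 hr1R'
    unfold pvW at hmono hw'
    omega

-- ---------- PART A: the BFS port satisfies pvAnsIs ----------
def pvKeyV (e : Int × PySem.Set Int) : Int × Finset Int := (e.1, e.2.toFinset)
def pvKeyQ (e : Int × Int × PySem.Set Int) : Int × Finset Int := (e.1, e.2.2.toFinset)

def pvDistEq (m n : Int) (table : List Int) (p0 : Int) (s : Int × Finset Int) (k : Nat) : Prop :=
  pvReach m n table p0 k s ∧ ∀ j, pvReach m n table p0 j s → k ≤ j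

def pvDone (m n : Int) (table : List Int) (V : List (Int × Finset Int)) (s : Int × Finset Int) : Prop :=
  ¬ pvGoal m n table s ∧ ∀ t, pvStep m n table s t → t ∈ V

def pvOkSet (n : Int) (table : List Int) (S : PySem.Set Int) : Prop :=
  S.Nodup ∧ ∀ x ∈ S, (1 ≤ x ∧ x ≤ n) ∧ x ∈ table

structure pvInv (m n : Int) (table : List Int) (p0 : Int)
    (q : List (Int × Int × PySem.Set Int)) (v : List (Int × PySem.Set Int)) : Prop where
  qcost : ∀ e ∈ q, ∃ k : Nat, e.2.1 = (k : Int) ∧ pvDistEq m n table p0 (pvKeyQ e) k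
  qset : ∀ e ∈ q, pvOkSet n table e.2.2
  qsorted : List.Pairwise (fun a b : Int × Int × PySem.Set Int => a.2.1 ≤ b.2.1) q
  qspread : ∀ h ∈ q.head?, ∀ e ∈ q, e.2.1 ≤ h.2.1 + 1
  vset : ∀ e ∈ v, pvOkSet n table e.2 ∧ (-1 ≤ e.1 ∧ e.1 ≤ m)
  vnodup : (v.map pvKeyV).Nodup
  vinit : (p0, (∅ : Finset Int)) ∈ v.map pvKeyV
  qv : ∀ e ∈ q, pvKeyQ e ∈ v.map pvKeyV
  vq : ∀ s ∈ v.map pvKeyV, (∃ e ∈ q, pvKeyQ e = s) ∨ pvDone m n table (v.map pvKeyV) s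

noncomputable def pvU (m n : Int) (table : List Int) : Finset (Int × Finset Int) :=
  Finset.Icc (-1) m ×ˢ (Finset.Icc 1 n ∩ table.toFinset).powerset

-- the visited-membership scan is exactly key membership
lemma pvVisMem (v : List (Int × PySem.Set Int)) (c : Int) (S : PySem.Set Int) :
    (v.any (fun e => e.1 == c && PySem.Set.equal e.2 S)) = true ↔ (c, S.toFinset) ∈ v.map pvKeyV := by
  rw [List.any_eq_true]
  simp only [List.mem_map, Bool.and_eq_true, beq_iff_eq]
  constructor
  · rintro ⟨e, he, h1, h2⟩
    refine ⟨e, he, ?_⟩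
    rw [PySem.Set.equal_iff] at h2
    have : e.2.toFinset = S.toFinset := by
      apply Finset.ext
      intro x
      rw [List.mem_toFinset, List.mem_toFinset]
      exact h2 x
    simp [pvKeyV, h1, this]
  · rintro ⟨e, he, hk⟩
    refine ⟨e, he, ?_⟩
    simp only [pvKeyV, Prod.ext_iff] at hk
    refine ⟨hk.1, ?_⟩
    rw [PySem.Set.equal_iff]
    intro x
    rw [← List.mem_toFinset, hk.2, List.mem_toFinset]

lemma pvV_subset_U (m n : Int) (table : List Int) (p0 : Int) (v : List (Int × PySem.Set Int))
    (hv : ∀ e ∈ v, pvOkSet n table e.2 ∧ (-1 ≤ e.1 ∧ e.1 ≤ m)) :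
    (v.map pvKeyV).toFinset ⊆ pvU m n table := by
  intro s hs
  rw [List.mem_toFinset, List.mem_map] at hs
  obtain ⟨e, he, rfl⟩ := hs
  obtain ⟨⟨hnd, hmem⟩, hpos⟩ := hv e he
  rw [pvU, Finset.mem_product]
  simp only [pvKeyV]
  constructor
  · rw [Finset.mem_Icc]; exact hpos
  · rw [Finset.mem_powerset]
    intro x hx
    rw [List.mem_toFinset] at hx
    obtain ⟨⟨h1, h2⟩, h3⟩ := hmem x hx
    rw [Finset.mem_inter, Finset.mem_Icc, List.mem_toFinset]
    exact ⟨⟨h1, h2⟩, h3⟩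

-- bridges between the port's concrete set operations and the abstract state view
lemma pvReq_contains (n t : Int) :
    PySem.Set.contains ((PySem.List.pyRange 1 (n + 1) 1 : PySem.Set Int)) t = true ↔
      (1 ≤ t ∧ t ≤ n) := by
  rw [PySem.Set.contains_iff, PySem.List.mem_pyRange_one]
  omega

lemma pvAdd_toFinset (S : PySem.Set Int) (t : Int) :
    (PySem.Set.add S t).toFinset = insert t S.toFinset := by
  rw [PySem.Set.add_eq_ite]
  split_ifs with h
  · rw [Finset.insert_eq_self.mpr (by rwa [List.mem_toFinset])]
  · simp [Finset.union_comm]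

lemma pvNewC_key (n : Int) (table : List Int) (pos : Int) (S : PySem.Set Int) :
    ((if PySem.Set.contains ((PySem.List.pyRange 1 (n + 1) 1 : PySem.Set Int))
          (PySem.List.pyGetD table pos 0) then
        PySem.Set.add S (PySem.List.pyGetD table pos 0) else S) : PySem.Set Int).toFinset =
      pvUpd n table (pos, S.toFinset) := by
  rw [pvUpd]
  have htv : pvTv table pos = PySem.List.pyGetD table pos 0 := rfl
  by_cases h : 1 ≤ PySem.List.pyGetD table pos 0 ∧ PySem.List.pyGetD table pos 0 ≤ n
  · rw [if_pos ((pvReq_contains n _).mpr h), if_pos (by rw [htv]; exact h)]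
    rw [pvAdd_toFinset, htv]
  · rw [if_neg (fun hc => h ((pvReq_contains n _).mp hc)), if_neg (by rw [htv]; exact h)]

lemma pvNewC_ok (m n : Int) (table : List Int) (pos : Int) (S : PySem.Set Int)
    (hok : pvOkSet n table S) (hvalid : 0 ≤ pos ∧ pos < m) (hm : m ≤ (table.length : Int)) :
    pvOkSet n table
      ((if PySem.Set.contains ((PySem.List.pyRange 1 (n + 1) 1 : PySem.Set Int))
            (PySem.List.pyGetD table pos 0) then
          PySem.Set.add S (PySem.List.pyGetD table pos 0) else S) : PySem.Set Int) := by
  split_ifs with h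
  · refine ⟨PySem.Set.nodup_add S _ hok.1, ?_⟩
    intro x hx
    rw [PySem.Set.mem_add] at hx
    rcases hx with hx | rfl
    · exact hok.2 x hx
    · refine ⟨(pvReq_contains n _).mp h, ?_⟩
      exact PySem.List.pyGetD_mem table 0 (by
        unfold PySem.Raise.InRange
        omega)
  · exact hok

lemma pvLenGoal (m n : Int) (table : List Int) (pos : Int) (S newC : PySem.Set Int)
    (hnd : newC.Nodup)
    (hkey : newC.toFinset = pvUpd n table (pos, S.toFinset))
    (hvalid : 0 ≤ pos ∧ pos < m) :
    (PySem.Set.len newC = n ↔ pvGoal m n table (pos, S.toFinset)) := by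
  rw [PySem.Set.len]
  unfold pvGoal
  rw [← hkey, List.toFinset_card_of_nodup hnd]
  constructor
  · intro h; exact ⟨hvalid, by exact_mod_cast h⟩
  · intro h; exact_mod_cast h.2

lemma pvDone_mono (m n : Int) (table : List Int) (V V' : List (Int × Finset Int))
    (hsub : ∀ x ∈ V, x ∈ V') (s : Int × Finset Int) (h : pvDone m n table V s) :
    pvDone m n table V' s :=
  ⟨h.1, fun t ht => hsub t (h.2 t ht)⟩

-- the completeness property of the BFS configuration: every state reached strictly below all
-- queued costs has been visited and fully expanded (derived from the invariant by strong induction)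
lemma pvFrontier (m n : Int) (table : List Int) (p0 : Int)
    (q : List (Int × Int × PySem.Set Int)) (v : List (Int × PySem.Set Int))
    (hinv : pvInv m n table p0 q v) :
    ∀ (j : Nat) (s : Int × Finset Int), pvReach m n table p0 j s →
      (∀ e ∈ q, (j : Int) < e.2.1) →
      s ∈ v.map pvKeyV ∧ pvDone m n table (v.map pvKeyV) s := by
  intro j
  induction j using Nat.strong_induction_on with
  | _ j ih =>
    intro s hr hlt
    have hmem : s ∈ v.map pvKeyV := by
      cases j with
      | zero =>
        rw [pvReach] at hr
        rw [hr]
        exact hinv.vinit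
      | succ j' =>
        rw [pvReach] at hr
        obtain ⟨r, hrr, hstep⟩ := hr
        have hlt' : ∀ e ∈ q, (j' : Int) < e.2.1 := by
          intro e he
          have := hlt e he
          push_cast at this ⊢
          omega
        have hdone := (ih j' (by omega) r hrr hlt').2
        exact hdone.2 s hstep
    refine ⟨hmem, ?_⟩
    rcases hinv.vq s hmem with ⟨e, he, hkey⟩ | hdone
    · obtain ⟨k, hk, hdist⟩ := hinv.qcost e he
      have h1 : k ≤ j := hdist.2 j (hkey ▸ hr)
      have h2 := hlt e he
      rw [hk] at h2
      exact absurd h1 (by push_cast at h2; omega)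
    · exact hdone

lemma pvInv_expand (m n : Int) (table : List Int) (p0 : Int)
    (pos cost : Int) (S : PySem.Set Int) (rest : List (Int × Int × PySem.Set Int))
    (v : List (Int × PySem.Set Int)) (k : Nat)
    (hinv : pvInv m n table p0 ((pos, cost, S) :: rest) v)
    (hvalid : 0 ≤ pos ∧ pos < m)
    (hk : cost = (k : Int))
    (hdist : pvDistEq m n table p0 (pos, S.toFinset) k)
    (newC : PySem.Set Int)
    (hnewCkey : newC.toFinset = pvUpd n table (pos, S.toFinset))
    (hnewOk : pvOkSet n table newC)
    (hngoal : ¬ pvGoal m n table (pos, S.toFinset))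
    (adds : List Int)
    (hadds : adds = (if (pos - 1, newC.toFinset) ∈ v.map pvKeyV then [] else [pos - 1]) ++
        (if (pos + 1, newC.toFinset) ∈ v.map pvKeyV then [] else [pos + 1])) :
    pvInv m n table p0 (rest ++ adds.map (fun p => (p, cost + 1, newC)))
        (v ++ adds.map (fun p => (p, newC))) ∧
      v.length + adds.length ≤ (pvU m n table).card := by
  have hmemhead : ((pos, cost, S) : Int × Int × PySem.Set Int) ∈ (pos, cost, S) :: rest := by simp
  have hpairtail : ∀ e ∈ rest, cost ≤ e.2.1 := by
    have := List.pairwise_cons.mp hinv.qsorted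
    exact fun e he => this.1 e he
  have hspread : ∀ e ∈ (pos, cost, S) :: rest, e.2.1 ≤ cost + 1 := by
    intro e he
    exact hinv.qspread (pos, cost, S) rfl e he
  have haddmem : ∀ p ∈ adds, (p = pos - 1 ∨ p = pos + 1) ∧ (p, newC.toFinset) ∉ v.map pvKeyV := by
    intro p hp
    rw [hadds, List.mem_append] at hp
    rcases hp with hp | hp <;> (split_ifs at hp with h <;> simp at hp) <;>
      (subst hp; simp [h])
  have haddnd : adds.Nodup := by
    rw [hadds]
    split_ifs with h1 h2 h2 <;> simp <;> omega
  have hstep_child : ∀ t, pvStep m n table (pos, S.toFinset) t →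
      t = (pos - 1, newC.toFinset) ∨ t = (pos + 1, newC.toFinset) := by
    intro t ht
    rcases ht.2 with h | h <;> rw [h, hnewCkey] <;> simp
  have hV2 : (v ++ adds.map (fun p => (p, newC))).map pvKeyV =
      v.map pvKeyV ++ adds.map (fun p => (p, newC.toFinset)) := by
    rw [List.map_append, List.map_map]
    rfl
  have hcover : ∀ t, pvStep m n table (pos, S.toFinset) t →
      t ∈ (v ++ adds.map (fun p => (p, newC))).map pvKeyV := by
    intro t ht
    rw [hV2, List.mem_append]
    rcases hstep_child t ht with h | h <;> subst h
    · by_cases hv1 : (pos - 1, newC.toFinset) ∈ v.map pvKeyV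
      · left; exact hv1
      · right
        rw [List.mem_map]
        refine ⟨pos - 1, ?_, rfl⟩
        rw [hadds, List.mem_append]
        left
        rw [if_neg hv1]
        simp
    · by_cases hv1 : (pos + 1, newC.toFinset) ∈ v.map pvKeyV
      · left; exact hv1
      · right
        rw [List.mem_map]
        refine ⟨pos + 1, ?_, rfl⟩
        rw [hadds, List.mem_append]
        right
        rw [if_neg hv1]
        simp
  have hchilddist : ∀ p ∈ adds, pvDistEq m n table p0 (p, newC.toFinset) (k + 1) := by
    intro p hp
    obtain ⟨hp12, hpnot⟩ := haddmem p hp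
    have hreach : pvReach m n table p0 (k + 1) (p, newC.toFinset) := by
      rw [pvReach]
      refine ⟨(pos, S.toFinset), hdist.1, hvalid, ?_⟩
      rcases hp12 with h | h <;> subst h
      · left; rw [hnewCkey]
      · right; rw [hnewCkey]
    refine ⟨hreach, ?_⟩
    intro j hj
    by_contra hc
    push_neg at hc
    cases j with
    | zero =>
      rw [pvReach] at hj
      apply hpnot
      rw [hj]
      exact hinv.vinit
    | succ j' =>
      rw [pvReach] at hj
      obtain ⟨r, hrr, hstepr⟩ := hj
      have hfr := pvFrontier m n table p0 ((pos, cost, S) :: rest) v hinv j' r hrr (by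
        intro e he
        have h1 := hpairtail
        rcases List.mem_cons.mp he with h | h
        · rw [h, hk]; push_cast; omega
        · have := hpairtail e h
          rw [hk] at this
          push_cast at this ⊢
          omega)
      exact hpnot (hfr.2.2 _ hstepr)
  refine ⟨⟨?_, ?_, ?_, ?_, ?_, ?_, ?_, ?_, ?_⟩, ?_⟩
  · -- qcost
    intro e he
    rcases List.mem_append.mp he with h | h
    · exact hinv.qcost e (by simp [h])
    · rw [List.mem_map] at h
      obtain ⟨p, hp, rfl⟩ := h
      exact ⟨k + 1, by rw [hk]; push_cast; ring, hchilddist p hp⟩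
  · -- qset
    intro e he
    rcases List.mem_append.mp he with h | h
    · exact hinv.qset e (by simp [h])
    · rw [List.mem_map] at h
      obtain ⟨p, _, rfl⟩ := h
      exact hnewOk
  · -- qsorted
    rw [List.pairwise_append]
    refine ⟨(List.pairwise_cons.mp hinv.qsorted).2, ?_, ?_⟩
    · rw [List.pairwise_map]
      exact List.pairwise_of_forall (fun _ _ => le_refl _)
    · intro a ha b hb
      rw [List.mem_map] at hb
      obtain ⟨p, _, rfl⟩ := hb
      exact hspread a (by simp [ha])
  · -- qspread
    have hall_le : ∀ e ∈ rest ++ adds.map (fun p => (p, cost + 1, newC)), e.2.1 ≤ cost + 1 := by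
      intro e he
      rcases List.mem_append.mp he with h | h
      · exact hspread e (by simp [h])
      · rw [List.mem_map] at h
        obtain ⟨p, _, rfl⟩ := h
        exact le_refl _
    have hall_ge : ∀ e ∈ rest ++ adds.map (fun p => (p, cost + 1, newC)), cost ≤ e.2.1 := by
      intro e he
      rcases List.mem_append.mp he with h | h
      · exact hpairtail e h
      · rw [List.mem_map] at h
        obtain ⟨p, _, rfl⟩ := h
        simp
    intro h' hh' e he
    have h1 := hall_le e he
    have h2 := hall_ge h' (List.mem_of_mem_head? hh')
    omega
  · -- vset
    intro e he
    rcases List.mem_append.mp he with h | h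
    · exact hinv.vset e h
    · rw [List.mem_map] at h
      obtain ⟨p, hp, rfl⟩ := h
      obtain ⟨h12, _⟩ := haddmem p hp
      exact ⟨hnewOk, by omega⟩
  · -- vnodup
    rw [hV2]
    rw [List.nodup_append]
    refine ⟨hinv.vnodup, ?_, ?_⟩
    · exact List.Nodup.map (fun a b hab => congrArg Prod.fst hab) haddnd
    · intro a ha b hb
      rw [List.mem_map] at hb
      obtain ⟨p, hp, rfl⟩ := hb
      intro heq
      exact (haddmem p hp).2 (heq ▸ ha)
  · -- vinit
    rw [hV2, List.mem_append]
    left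
    exact hinv.vinit
  · -- qv
    intro e he
    rw [hV2, List.mem_append]
    rcases List.mem_append.mp he with h | h
    · left; exact hinv.qv e (by simp [h])
    · right
      rw [List.mem_map] at h
      obtain ⟨p, hp, rfl⟩ := h
      rw [List.mem_map]
      exact ⟨p, hp, rfl⟩
  · -- vq
    intro s hs
    rw [hV2, List.mem_append] at hs
    have hsub : ∀ x ∈ v.map pvKeyV, x ∈ (v ++ adds.map (fun p => (p, newC))).map pvKeyV := by
      intro x hx
      rw [hV2, List.mem_append]
      left
      exact hx
    rcases hs with hs | hs
    · rcases hinv.vq s hs with ⟨e, he, hkeyeq⟩ | hdone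
      · rcases List.mem_cons.mp he with h | h
        · subst h
          right
          refine ⟨?_, ?_⟩
          · rw [← hkeyeq]; exact hngoal
          · intro t ht
            rw [← hkeyeq] at ht
            exact hcover t ht
        · left
          exact ⟨e, by rw [List.mem_append]; left; exact h, hkeyeq⟩
      · right
        exact pvDone_mono m n table _ _ hsub s hdone
    · left
      rw [List.mem_map] at hs
      obtain ⟨p, hp, rfl⟩ := hs
      refine ⟨(p, cost + 1, newC), ?_, rfl⟩
      rw [List.mem_append]
      right
      rw [List.mem_map]
      exact ⟨p, hp, rfl⟩
  · -- cardinality bound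
    have hnd2 : ((v ++ adds.map (fun p => (p, newC))).map pvKeyV).Nodup := by
      rw [hV2, List.nodup_append]
      refine ⟨hinv.vnodup, List.Nodup.map (fun a b hab => congrArg Prod.fst hab) haddnd, ?_⟩
      intro a ha b hb
      rw [List.mem_map] at hb
      obtain ⟨p, hp, rfl⟩ := hb
      intro heq
      exact (haddmem p hp).2 (heq ▸ ha)
    have hsubU := pvV_subset_U m n table p0 (v ++ adds.map (fun p => (p, newC))) (by
      intro e he
      rcases List.mem_append.mp he with h | h
      · exact hinv.vset e h
      · rw [List.mem_map] at h
        obtain ⟨p, hp, rfl⟩ := h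
        exact ⟨hnewOk, by have := (haddmem p hp).1; omega⟩)
    have hcard := Finset.card_le_card hsubU
    rw [List.toFinset_card_of_nodup hnd2] at hcard
    simp only [List.length_map, List.length_append] at hcard
    omega

lemma pvBfsA_correct (m n : Int) (table : List Int) (position : Int)
    (hm : m ≤ (table.length : Int)) (hv : 0 ≤ position - 1 ∧ position - 1 < m) :
    ∀ (fuel : Nat) (q : List (Int × Int × PySem.Set Int)) (v : List (Int × PySem.Set Int)),
    pvInv m n table (position - 1) q v →
    2 * ((pvU m n table).card - v.length) + q.length < fuel →
    pvAnsIs m n table (position - 1)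
      (pvBfsA m n table ((PySem.List.pyRange 1 (n + 1) 1 : PySem.Set Int)) fuel q v) := by
  intro fuel
  induction fuel using Nat.strong_induction_on with
  | _ fuel ih =>
    intro q v hinv hfuel
    cases fuel with
    | zero => omega
    | succ f =>
      cases q with
      | nil =>
        rw [pvBfsA]
        right
        refine ⟨rfl, fun j s hr => ?_⟩
        exact (pvFrontier m n table (position - 1) [] v hinv j s hr
          (by intro e he; cases he)).2.1
      | cons e rest =>
        obtain ⟨pos, cost, S⟩ := e
        obtain ⟨k, hk, hdist⟩ := hinv.qcost (pos, cost, S) (by simp)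
        have hok := hinv.qset (pos, cost, S) (by simp)
        have hltq : ∀ (j : Nat), j < k →
            ∀ e ∈ (pos, cost, S) :: rest, (j : Int) < e.2.1 := by
          intro j hj e he
          rcases List.mem_cons.mp he with h | h
          · subst h
            rw [hk]
            push_cast
            omega
          · have := (List.pairwise_cons.mp hinv.qsorted).1 e h
            rw [hk] at this
            push_cast at this ⊢
            omega
        rw [pvBfsA]
        by_cases hvalid : 0 ≤ pos ∧ pos < m
        · rw [if_pos hvalid]
          dsimp only
          have hokN := pvNewC_ok m n table pos S hok hvalid hm
          have hkey := pvNewC_key n table pos S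
          set newC := (if PySem.Set.contains ((PySem.List.pyRange 1 (n + 1) 1 : PySem.Set Int))
              (PySem.List.pyGetD table pos 0) then
            PySem.Set.add S (PySem.List.pyGetD table pos 0) else S) with hnewC
          have hgiff := pvLenGoal m n table pos S newC hokN.1 hkey hvalid
          by_cases hgl : PySem.Set.len newC = n
          · rw [if_pos hgl]
            left
            refine ⟨k, hk, ⟨(pos, S.toFinset), hdist.1, hgiff.mp hgl⟩, ?_⟩
            intro j s' hr' hg'
            by_contra hc
            push_neg at hc
            have hfr := pvFrontier m n table (position - 1) ((pos, cost, S) :: rest) v hinv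
              j s' hr' (hltq j hc)
            exact absurd hg' hfr.2.1
          · rw [if_neg hgl]
            have hngoal : ¬ pvGoal m n table (pos, S.toFinset) := fun hg => hgl (hgiff.mpr hg)
            have hvm1 := pvVisMem v (pos - 1) newC
            by_cases h1 : ((pos - 1, newC.toFinset) ∈ v.map pvKeyV)
            · rw [if_pos (hvm1.mpr h1), if_pos (hvm1.mpr h1)]
              have hvm2 := pvVisMem v (pos + 1) newC
              by_cases h2 : ((pos + 1, newC.toFinset) ∈ v.map pvKeyV)
              · rw [if_pos (hvm2.mpr h2), if_pos (hvm2.mpr h2)]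
                obtain ⟨hinv', hcard⟩ := pvInv_expand m n table (position - 1) pos cost S rest v k
                  hinv hvalid hk hdist newC hkey hokN hngoal [] (by rw [if_pos h1, if_pos h2]; rfl)
                simp only [List.map_nil, List.append_nil] at hinv' hcard
                apply ih f (by omega) rest v hinv'
                simp only [List.length_cons] at hfuel
                omega
              · rw [if_neg (fun hb : _ = true => h2 (hvm2.mp hb)), if_neg (fun hb : _ = true => h2 (hvm2.mp hb))]
                obtain ⟨hinv', hcard⟩ := pvInv_expand m n table (position - 1) pos cost S rest v k
                  hinv hvalid hk hdist newC hkey hokN hngoal [pos + 1]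
                  (by rw [if_pos h1, if_neg h2]; rfl)
                simp only [List.map_cons, List.map_nil] at hinv'
                apply ih f (by omega) _ _ hinv'
                simp only [List.length_cons, List.length_append, List.length_nil] at hfuel ⊢
                simp only [List.length_singleton] at hcard
                omega
            · rw [if_neg (fun hb : _ = true => h1 (hvm1.mp hb)), if_neg (fun hb : _ = true => h1 (hvm1.mp hb))]
              have hvm2' := pvVisMem (v ++ [(pos - 1, newC)]) (pos + 1) newC
              have hvm2eq : ((pos + 1, newC.toFinset) ∈ (v ++ [(pos - 1, newC)]).map pvKeyV) ↔
                  ((pos + 1, newC.toFinset) ∈ v.map pvKeyV) := by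
                rw [List.map_append, List.mem_append]
                constructor
                · rintro (h | h)
                  · exact h
                  · simp only [List.map_cons, List.map_nil, List.mem_singleton] at h
                    exfalso
                    have : pos + 1 = pos - 1 := congrArg Prod.fst h
                    omega
                · intro h; left; exact h
              by_cases h2 : ((pos + 1, newC.toFinset) ∈ v.map pvKeyV)
              · rw [if_pos (hvm2'.mpr (hvm2eq.mpr h2)), if_pos (hvm2'.mpr (hvm2eq.mpr h2))]
                obtain ⟨hinv', hcard⟩ := pvInv_expand m n table (position - 1) pos cost S rest v k
                  hinv hvalid hk hdist newC hkey hokN hngoal [pos - 1]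
                  (by rw [if_neg h1, if_pos h2]; rfl)
                simp only [List.map_cons, List.map_nil] at hinv'
                apply ih f (by omega) _ _ hinv'
                simp only [List.length_cons, List.length_append, List.length_nil] at hfuel ⊢
                simp only [List.length_singleton] at hcard
                omega
              · rw [if_neg (fun hb : _ = true => h2 (hvm2eq.mp (hvm2'.mp hb))), if_neg (fun hb : _ = true => h2 (hvm2eq.mp (hvm2'.mp hb)))]
                obtain ⟨hinv', hcard⟩ := pvInv_expand m n table (position - 1) pos cost S rest v k
                  hinv hvalid hk hdist newC hkey hokN hngoal [pos - 1, pos + 1]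
                  (by rw [if_neg h1, if_neg h2]; rfl)
                simp only [List.map_cons, List.map_nil] at hinv'
                rw [List.append_assoc, List.append_assoc]
                apply ih f (by omega) _ _ hinv'
                simp only [List.length_cons, List.length_append, List.length_nil] at hfuel ⊢
                simp only [List.length_cons, List.length_nil] at hcard
                omega
        · rw [if_neg hvalid]
          have hinv' : pvInv m n table (position - 1) rest v := by
            refine ⟨fun e he => hinv.qcost e (by simp [he]),
              fun e he => hinv.qset e (by simp [he]),
              (List.pairwise_cons.mp hinv.qsorted).2, ?_, hinv.vset, hinv.vnodup, hinv.vinit,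
              fun e he => hinv.qv e (by simp [he]), ?_⟩
            · intro h' hh' e he
              have h1 := hinv.qspread (pos, cost, S) rfl e (by simp [he])
              have h2 := (List.pairwise_cons.mp hinv.qsorted).1 h' (List.mem_of_mem_head? hh')
              omega
            · intro s hs
              rcases hinv.vq s hs with ⟨e, he, hkeyeq⟩ | hdone
              · rcases List.mem_cons.mp he with h | h
                · subst h
                  right
                  refine ⟨?_, ?_⟩
                  · rw [← hkeyeq]
                    intro hg
                    exact hvalid hg.1
                  · intro t ht
                    rw [← hkeyeq] at ht
                    exact absurd ht.1 hvalid
                · left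
                  exact ⟨e, h, hkeyeq⟩
              · right
                exact hdone
          apply ih f (by omega) rest v hinv'
          simp only [List.length_cons] at hfuel
          omega

lemma pvA_ansIs (m n position : Int) (table : List Int)
    (hm : m ≤ (table.length : Int)) (hv : 0 ≤ position - 1 ∧ position - 1 < m) :
    pvAnsIs m n table (position - 1) (min_cost_collect_balls m n position table) := by
  unfold min_cost_collect_balls
  apply pvBfsA_correct m n table position hm hv
  · constructor
    · intro e he
      rw [List.mem_singleton] at he
      subst he
      refine ⟨0, rfl, ?_, ?_⟩
      · rw [pvReach]; rfl
      · intro j _; omega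
    · intro e he
      rw [List.mem_singleton] at he
      subst he
      exact ⟨List.nodup_nil, by intro x hx; cases hx⟩
    · simp
    · intro h hh e he
      simp at hh he
      rw [← hh, he]
      simp
    · intro e he
      rw [List.mem_singleton] at he
      subst he
      exact ⟨⟨List.nodup_nil, by intro x hx; cases hx⟩, by omega⟩
    · simp
    · simp [pvKeyV, PySem.Set.empty]
    · intro e he
      rw [List.mem_singleton] at he
      subst he
      simp [pvKeyQ, pvKeyV, PySem.Set.empty]
    · intro s hs
      left
      refine ⟨((position - 1 : Int), (0 : Int), (PySem.Set.empty : PySem.Set Int)), by simp, ?_⟩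
      simp [pvKeyV, PySem.Set.empty] at hs
      simp [pvKeyQ, PySem.Set.empty, hs]
  · -- the chosen fuel exceeds twice the size of the reachable-state universe
    have hU : (pvU m n table).card ≤ (m.toNat + 3) * 2 ^ table.length := by
      rw [pvU, Finset.card_product, Finset.card_powerset, Int.card_Icc]
      have h1 : (m - -1 + 1).toNat ≤ m.toNat + 3 := by omega
      have h2 : (Finset.Icc 1 n ∩ table.toFinset).card ≤ table.length := by
        calc (Finset.Icc 1 n ∩ table.toFinset).card
            ≤ table.toFinset.card := Finset.card_le_card Finset.inter_subset_right
          _ ≤ table.length := table.toFinset_card_le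
      exact Nat.mul_le_mul h1 (Nat.pow_le_pow_right (by omega) h2)
    simp only [List.length_singleton]
    omega

lemma pvA_invalid (m n position : Int) (table : List Int)
    (hv : ¬ (0 ≤ position - 1 ∧ position - 1 < m)) :
    min_cost_collect_balls m n position table = -1 := by
  unfold min_cost_collect_balls
  rw [show 2 * ((m.toNat + 3) * 2 ^ table.length) + 4
      = (2 * ((m.toNat + 3) * 2 ^ table.length) + 2) + 1 + 1 from by omega]
  rw [pvBfsA, if_neg hv, pvBfsA]

-- ===== VERDICT (by name: the statement is the Claim_ definition above) =====
theorem min_cost_collect_balls_spec : Claim_equal_min_cost_collect_balls := by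
  intro m n position table _hdom hpre
  unfold Spec_min_cost_collect_balls
  by_cases hv : 0 ≤ position - 1 ∧ position - 1 < m
  · have hm : m ≤ (table.length : Int) := by
      rcases hpre with h | h
      · exact h
      · exact absurd hv h
    exact pvAnsIs_unique m n table (position - 1) _ _
      (pvA_ansIs m n position table hm hv) (pvAlt_ansIs m n position table hv)
  · have hA := pvA_invalid m n position table hv
    have hB : min_cost_collect_balls_alt m n position table = -1 := by
      unfold min_cost_collect_balls_alt
      rw [if_pos (by omega)]
    rw [hA, hB]
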